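-- pv_equiv track=rewrite | github.com/suryakumaran2611/auto-arch-diagram | tools/generate_arch_diagram.py | _fallback_chain_edges
-- ===== SOURCE A (Python) =====
-- from typing import Any, Iterable, Optional
--
-- def _module_prefix_for_resource(res_name: str) -> str | None:
--     try:
--         _rtype, rname = res_name.split(".", 1)
--     except ValueError:
--         return None
--     base_name = rname
--     env_prefix = None
--     if "__" in rname:
--         prefix, rest = rname.split("__", 1)
--         if _is_known_env(prefix):
--             env_prefix = prefix
--             base_name = rest
--     if base_name.startswith("module_") and "__" in base_name:
--         module_prefix = base_name.split("__", 1)[0] + "__"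
--         if env_prefix:
--             return f"{env_prefix}__{module_prefix}"
--         return module_prefix
--     return None
--
-- _KNOWN_ENV_NAMES = {
--     "dev",
--     "development",
--     "preprod",
--     "pre-prod",
--     "prod",
--     "production",
--     "stage",
--     "staging",
--     "qa",
--     "test",
--     "uat",
--     "sandbox",
--     "shared",
-- }
--
-- def _is_known_env(name: str) -> bool:
--     return name.strip().lower() in _KNOWN_ENV_NAMES
--
-- def _fallback_chain_edges(resources: dict[str, dict[str, Any]]) -> set[tuple[str, str]]:
--     """Create simple chain edges when no explicit refs are found."""
--     groups: dict[str, list[str]] = {}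
--     for res in resources.keys():
--         prefix = _module_prefix_for_resource(res) or ""
--         groups.setdefault(prefix, []).append(res)
--
--     edges: set[tuple[str, str]] = set()
--     for res_list in groups.values():
--         ordered = sorted(res_list)
--         for src, dst in zip(ordered, ordered[1:]):
--             edges.add((src, dst))
--     return edges
-- ===== SOURCE B (Python) =====
-- _KNOWN_ENV_NAMES = {
--     "dev", "development", "preprod", "pre-prod", "prod", "production",
--     "stage", "staging", "qa", "test", "uat", "sandbox", "shared",
-- }
--
-- def _is_known_env(name: str) -> bool:
--     return name.strip().lower() in _KNOWN_ENV_NAMES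
--
-- def _module_prefix_for_resource(res_name: str):
--     try:
--         _rtype, rname = res_name.split(".", 1)
--     except ValueError:
--         return None
--     base_name = rname
--     env_prefix = None
--     if "__" in rname:
--         prefix, rest = rname.split("__", 1)
--         if _is_known_env(prefix):
--             env_prefix = prefix
--             base_name = rest
--     if base_name.startswith("module_") and "__" in base_name:
--         module_prefix = base_name.split("__", 1)[0] + "__"
--         if env_prefix:
--             return f"{env_prefix}__{module_prefix}"
--         return module_prefix
--     return None
--
-- def _prefix(res_name):
--     return _module_prefix_for_resource(res_name) or ""
--
-- def _fallback_chain_edges(resources):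
--     """Create simple chain edges when no explicit refs are found."""
--     keys = list(resources)
--     edges = set()
--     # Repeated partition: peel off the whole group of the first key's prefix,
--     # chain it with a last-seen sweep, and continue on the remainder.
--     while keys:
--         p = _prefix(keys[0])
--         group = sorted(r for r in keys if _prefix(r) == p)
--         keys = [r for r in keys if _prefix(r) != p]
--         prev = None
--         for r in group:
--             if prev is not None:
--                 edges.add((prev, r))
--             prev = r
--     return edges
-- ===== Notes on version B (the rewrite author's own statement) =====
-- stated objective: alternative
-- what changed: B drops A's two-phase grouping (setdefault dict then sort-and-zip each bucket) for a repeated-partition loop: peel off the first key's whole prefix group, chain it by a last-seen sweep instead of zip, and recurse on the remaining keys.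
import Mathlib
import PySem

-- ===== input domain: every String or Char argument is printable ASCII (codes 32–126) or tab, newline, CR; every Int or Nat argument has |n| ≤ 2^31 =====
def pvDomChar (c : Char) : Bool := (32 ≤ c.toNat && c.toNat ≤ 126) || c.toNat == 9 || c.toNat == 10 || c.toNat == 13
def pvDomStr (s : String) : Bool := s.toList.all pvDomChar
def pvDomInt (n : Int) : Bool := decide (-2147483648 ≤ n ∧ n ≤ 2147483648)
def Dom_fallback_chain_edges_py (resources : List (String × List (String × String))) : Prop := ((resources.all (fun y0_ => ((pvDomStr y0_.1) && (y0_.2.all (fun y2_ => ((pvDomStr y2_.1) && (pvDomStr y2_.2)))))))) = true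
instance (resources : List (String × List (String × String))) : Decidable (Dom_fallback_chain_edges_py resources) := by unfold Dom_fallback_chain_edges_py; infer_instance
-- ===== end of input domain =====

-- B replaces A's two-phase grouping (setdefault dict, then sort-and-zip each bucket) with a
-- repeated-partition loop: peel off the first key's whole prefix group, chain it with a
-- last-seen sweep, recurse on the remainder (objective: alternative; same cost class).

-- ===== PORT A =====
-- shared helper: _is_known_env
def pvKnownEnvs : PySem.Set String := PySem.Set.ofList
  ["dev", "development", "preprod", "pre-prod", "prod", "production", "stage",
   "staging", "qa", "test", "uat", "sandbox", "shared"]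

def pvIsKnownEnv (name : String) : Bool :=
  PySem.Set.contains pvKnownEnvs (PySem.Str.lower (PySem.Str.strip name))

-- shared helper: _module_prefix_for_resource (try/except on the 2-way unpack becomes a match)
def pvModulePrefix (res_name : String) : Option String :=
  match (PySem.Str.splitMax? res_name "." 1).getD [] with
  | [_rtype, rname] =>
    let (env_prefix, base_name) : Option String × String :=
      if PySem.Str.isIn "__" rname then
        match (PySem.Str.splitMax? rname "__" 1).getD [] with
        | [pre, rest] => if pvIsKnownEnv pre then (some pre, rest) else (none, rname)
        | _ => (none, rname)
      else (none, rname)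
    if PySem.Str.startswith base_name "module_" && PySem.Str.isIn "__" base_name then
      let module_prefix := PySem.List.pyGetD ((PySem.Str.splitMax? base_name "__" 1).getD []) 0 "" ++ "__"
      match env_prefix with
      | some env => some (env ++ "__" ++ module_prefix)
      | none => some module_prefix
    else none
  | _ => none   -- ValueError on unpacking: caught, returns None

-- shared helper: `_module_prefix_for_resource(res) or ""` ('' and None are both falsy)
def pvPfx (res : String) : String := (pvModulePrefix res).getD ""

def fallback_chain_edges_py (resources : List (String × List (String × String))) : List (String × String) :=
  let keys := (PySem.Dict.ofList resources).keys
  let groups : PySem.Dict String (List String) :=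
    keys.foldl (fun g res => g.modify (pvPfx res) [] (fun l => l ++ [res])) PySem.Dict.empty
  (PySem.Dict.values groups).foldl (fun edges res_list =>
      let ordered := PySem.List.sorted res_list (fun x => x) false
      (ordered.zip (PySem.List.slice ordered (some 1) none)).foldl
        (fun edges pr => PySem.Set.add edges pr) edges)
    PySem.Set.empty

-- ===== PORT B =====
-- the `prev`-tracking sweep over one sorted group (`for r in group: if prev is not None: …`)
def pvSweepStep (st : List (String × String) × Option String) (r : String) :
    List (String × String) × Option String :=
  match st.2 with
  | some prev => (PySem.Set.add st.1 (prev, r), some r)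
  | none => (st.1, some r)

-- the `while keys:` repeated-partition loop of B
def pvAltLoop : List String → List (String × String) → List (String × String)
  | [], edges => edges
  | k0 :: rest, edges =>
    let p := pvPfx k0
    let group := PySem.List.sorted ((k0 :: rest).filter (fun r => pvPfx r == p)) (fun x => x) false
    pvAltLoop ((k0 :: rest).filter (fun r => !(pvPfx r == p)))
      (group.foldl pvSweepStep (edges, none)).1
termination_by keys _ => keys.length
decreasing_by
  have h := List.length_filter_le (fun r => !(pvPfx r == pvPfx k0)) rest
  simp
  omega

def fallback_chain_edges_py_alt (resources : List (String × List (String × String))) : List (String × String) :=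
  pvAltLoop (PySem.List.dedup (resources.map Prod.fst)) PySem.Set.empty

-- ===== PRECONDITION & SPEC =====
def Spec_fallback_chain_edges_py (resources : List (String × List (String × String))) (out : List (String × String)) : Prop := out = fallback_chain_edges_py_alt resources
instance (resources : List (String × List (String × String))) (out : List (String × String)) : Decidable (Spec_fallback_chain_edges_py resources out) := by unfold Spec_fallback_chain_edges_py; infer_instance

-- ===== CLAIM (what is proved, stated in full; the proofs are below) =====
def Claim_equal_fallback_chain_edges_py : Prop := ∀ (resources : List (String × List (String × String))), Dom_fallback_chain_edges_py resources → Spec_fallback_chain_edges_py resources (fallback_chain_edges_py resources)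

-- ===== LEMMAS AND PROOFS =====

-- A's grouping dict, looked up at any prefix c, is the filter of the key list at c.
theorem pv_groups_getD (keys : List String) (c : String) :
    (keys.foldl (fun g res => g.modify (pvPfx res) [] (fun l => l ++ [res]))
        (PySem.Dict.empty : PySem.Dict String (List String))).getD c []
      = keys.filter (fun r => pvPfx r == c) := by
  have h : keys.foldl (fun g res => g.modify (pvPfx res) [] (fun l => l ++ [res]))
        (PySem.Dict.empty : PySem.Dict String (List String))
      = (keys.map (fun r => (pvPfx r, r))).foldl
          (fun g p => g.modify p.1 [] (fun l => l ++ [p.2])) PySem.Dict.empty := by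
    rw [List.foldl_map]
  rw [h, PySem.Dict.getD_foldl_modify_append]
  simp [List.filter_map, Function.comp_def]

-- A equals the grouping-free form: fold over the deduped prefix list, filtering the keys.
theorem pv_chain (keys : List String) :
    (PySem.Dict.values (keys.foldl (fun g res => g.modify (pvPfx res) [] (fun l => l ++ [res]))
        (PySem.Dict.empty : PySem.Dict String (List String)))).foldl
      (fun edges res_list =>
        let ordered := PySem.List.sorted res_list (fun x => x) false
        (ordered.zip (PySem.List.slice ordered (some 1) none)).foldl
          (fun edges pr => PySem.Set.add edges pr) edges) PySem.Set.empty
    = (PySem.List.dedup (keys.map pvPfx)).foldl (fun edges p =>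
        let ordered := PySem.List.sorted (keys.filter (fun r => pvPfx r == p)) (fun x => x) false
        PySem.Set.update edges (ordered.zip (PySem.List.slice ordered (some 1) none)))
      PySem.Set.empty := by
  set g := keys.foldl (fun g res => g.modify (pvPfx res) [] (fun l => l ++ [res]))
      (PySem.Dict.empty : PySem.Dict String (List String)) with hg
  have hnd : g.keys.Nodup := by
    rw [hg]
    exact PySem.Dict.nodup_keys_foldl_modify_key keys pvPfx [] _ _ PySem.Dict.nodup_keys_empty
  have hkeysg : g.keys = PySem.List.dedup (keys.map pvPfx) := by
    rw [hg, PySem.Dict.keys_foldl_modify_key]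
    simp [PySem.Dict.keys_empty, PySem.Set.update, (PySem.Set.ofList_eq_foldl (keys.map pvPfx)).symm]
  have hvals : PySem.Dict.values g
      = (PySem.List.dedup (keys.map pvPfx)).map (fun p => keys.filter (fun r => pvPfx r == p)) := by
    rw [PySem.Dict.values_eq_map_keys g hnd [], hkeysg]
    exact List.map_congr_left (fun p _ => pv_groups_getD keys p)
  rw [hvals, List.foldl_map]
  rfl

-- set(xs) commutes with filtering (on the list representation).
theorem pv_filter_foldl_add {α : Type} [BEq α] [LawfulBEq α] (q : α → Bool) :
    ∀ (l : List α) (s : PySem.Set α),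
      (l.foldl PySem.Set.add s).filter q = (l.filter q).foldl PySem.Set.add (s.filter q) := by
  intro l
  induction l with
  | nil => intro s; rfl
  | cons x t ih =>
    intro s
    have hadd : (PySem.Set.add s x).filter q
        = if q x then PySem.Set.add (s.filter q) x else s.filter q := by
      by_cases hm : x ∈ s <;> by_cases hq : q x <;>
        simp [PySem.Set.add, PySem.Set.contains, hm, hq, List.filter_append, List.mem_filter]
    by_cases hq : q x <;> simp [hq, ih, hadd]

theorem pv_discard_ofList {α : Type} [BEq α] [LawfulBEq α] (l : List α) (a : α) :
    (PySem.Set.ofList l).discard a = PySem.Set.ofList (l.filter fun x => !(x == a)) := by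
  have := pv_filter_foldl_add (fun x => !(x == a)) l PySem.Set.empty
  simpa [PySem.Set.discard, PySem.Set.ofList, PySem.Set.empty] using this

-- dict key order: first occurrences of the pair list's first components.
theorem pv_keys_ofList (resources : List (String × List (String × String))) :
    (PySem.Dict.ofList resources).keys = PySem.List.dedup (resources.map Prod.fst) := by
  have h : PySem.Dict.ofList resources
      = resources.foldl (fun d x => d.insert x.1 x.2) PySem.Dict.empty := rfl
  rw [h, PySem.Dict.keys_foldl_insert_key resources Prod.fst (fun _ x => x.2)]
  simp [PySem.Dict.keys_empty, PySem.Set.update,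
    (PySem.Set.ofList_eq_foldl (resources.map Prod.fst)).symm]

-- the prev-sweep is exactly "add all consecutive pairs".
theorem pv_sweep (l : List String) :
    ∀ (prev : String) (e : List (String × String)),
      (l.foldl pvSweepStep (e, some prev)).1 = PySem.Set.update e ((prev :: l).zip l) := by
  induction l with
  | nil => intro prev e; rfl
  | cons b t ih =>
    intro prev e
    simp only [List.foldl_cons, pvSweepStep]
    rw [ih b (PySem.Set.add e (prev, b))]
    rfl

theorem pv_sweep_none (l : List String) (e : List (String × String)) :
    (l.foldl pvSweepStep (e, none)).1 = PySem.Set.update e (l.zip l.tail) := by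
  cases l with
  | nil => rfl
  | cons a t => exact pv_sweep t a e

-- map over filter-through-the-map
theorem pv_map_filter {α β : Type} (f : α → β) (q : β → Bool) (l : List α) :
    (l.filter (fun x => q (f x))).map f = (l.map f).filter q := by
  induction l with
  | nil => rfl
  | cons a t ih => by_cases h : q (f a) <;> simp [h, ih]

-- the dedup-prefix fold equals B's repeated-partition loop, for any key list and seed.
theorem pv_outer (keys : List String) (edges : List (String × String)) :
    (PySem.List.dedup (keys.map pvPfx)).foldl (fun edges p =>
        let ordered := PySem.List.sorted (keys.filter (fun r => pvPfx r == p)) (fun x => x) false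
        PySem.Set.update edges (ordered.zip (PySem.List.slice ordered (some 1) none))) edges
    = pvAltLoop keys edges := by
  match keys with
  | [] =>
    conv_rhs => rw [pvAltLoop]
    rfl
  | k0 :: rest =>
    have hded : PySem.List.dedup ((k0 :: rest).map pvPfx)
        = pvPfx k0 :: PySem.List.dedup ((rest.map pvPfx).filter (fun x => !(x == pvPfx k0))) := by
      rw [show (k0 :: rest).map pvPfx = pvPfx k0 :: rest.map pvPfx from rfl,
        PySem.List.dedup_eq_ofList, PySem.Set.ofList_cons, pv_discard_ofList,
        ← PySem.List.dedup_eq_ofList]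
    have hkeys' : (k0 :: rest).filter (fun r => !(pvPfx r == pvPfx k0))
        = rest.filter (fun r => !(pvPfx r == pvPfx k0)) := by
      simp
    have hmap' : (rest.filter (fun r => !(pvPfx r == pvPfx k0))).map pvPfx
        = (rest.map pvPfx).filter (fun x => !(x == pvPfx k0)) :=
      pv_map_filter pvPfx (fun x => !(x == pvPfx k0)) rest
    have ih := pv_outer (rest.filter (fun r => !(pvPfx r == pvPfx k0)))
    rw [hded, List.foldl_cons]
    conv_rhs => rw [pvAltLoop]
    rw [hkeys', pv_sweep_none,
      ← PySem.List.slice_from_one ((PySem.List.sorted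
        ((k0 :: rest).filter (fun r => pvPfx r == pvPfx k0)) (fun x => x) false)),
      ← ih, hmap']
    apply PySem.List.foldl_congr_mem
    intro acc q hq
    have hne : ¬ q = pvPfx k0 := by
      have h1 : q ∈ (rest.map pvPfx).filter (fun x => !(x == pvPfx k0)) :=
        (PySem.List.mem_dedup _ _).mp hq
      have h2 := (List.mem_filter.mp h1).2
      simpa using h2
    have hqp : (pvPfx k0 == q) = false := by
      simp
      exact fun e => hne e.symm
    have hfil : (k0 :: rest).filter (fun r => pvPfx r == q)
        = (rest.filter (fun r => !(pvPfx r == pvPfx k0))).filter (fun r => pvPfx r == q) := by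
      rw [List.filter_filter]
      simp only [List.filter_cons, hqp, Bool.false_eq_true, if_false]
      apply List.filter_congr
      intro r _
      by_cases h : pvPfx r = q
      · subst h
        simp [hne]
      · simp [h]
    simp only [hfil]
termination_by keys.length
decreasing_by
  have h := List.length_filter_le (fun r => !(pvPfx r == pvPfx k0)) rest
  simp
  omega

theorem pv_main (resources : List (String × List (String × String))) :
    fallback_chain_edges_py resources = fallback_chain_edges_py_alt resources := by
  unfold fallback_chain_edges_py fallback_chain_edges_py_alt
  rw [pv_chain, pv_outer, pv_keys_ofList]

-- ===== VERDICT (by name: the statement is the Claim_ definition above) =====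
theorem fallback_chain_edges_py_spec : Claim_equal_fallback_chain_edges_py := by
  intro resources _
  unfold Spec_fallback_chain_edges_py
  exact pv_main resources
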